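-- pv_equiv track=rewrite | github.com/Gwxnbleidd/data_protection | app/utils/encryption.py | form_key
-- ===== SOURCE A (Python) =====
-- def form_key(password: str):
--     key = []
--     password = list(password)
--     sort_password = sorted(password)
--     for el in password:
--         index = sort_password.index(el)
--         key.append(index)
--         sort_password[index] = '\1'
--     return key
-- ===== SOURCE B (Python) =====
-- def form_key(password: str):
--     sort_password = sorted(password)
--     start = {}
--     for i, c in enumerate(sort_password):
--         if c not in start:
--             start[c] = i
--     seen = {}
--     key = []
--     for c in password:
--         k = seen.get(c, 0)
--         key.append(start[c] + k)
--         seen[c] = k + 1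
--     return key
-- ===== Notes on version B (the rewrite author's own statement) =====
-- stated objective: faster
-- what changed: Replaces the per-character linear scan plus in-place marker mutation of the sorted list by one sort, a first-index table per distinct character, and a per-character occurrence counter, giving each character rank = first sorted index + occurrences seen so far.
import Mathlib
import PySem

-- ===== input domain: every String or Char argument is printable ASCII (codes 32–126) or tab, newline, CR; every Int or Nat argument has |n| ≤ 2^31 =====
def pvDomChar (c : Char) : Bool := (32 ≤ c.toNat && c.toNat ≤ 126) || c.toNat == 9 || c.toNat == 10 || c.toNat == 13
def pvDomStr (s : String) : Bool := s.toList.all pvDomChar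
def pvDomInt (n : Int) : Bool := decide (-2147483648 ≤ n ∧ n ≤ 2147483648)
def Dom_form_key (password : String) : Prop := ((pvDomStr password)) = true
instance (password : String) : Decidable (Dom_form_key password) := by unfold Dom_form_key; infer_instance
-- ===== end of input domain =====

-- B replaces A's quadratic scan-and-mark of the sorted list by one sort, a first-index table per
-- distinct character, and a per-character occurrence counter (faster; asymptotic O(n^2) → O(n log n)).

-- ===== PORT A =====
-- A-side helper: one iteration of A's for-loop (index lookup, append, mark the used slot)
def formKeyStep (st : List Char × List Int) (el : Char) : List Char × List Int :=
  match PySem.List.index? st.1 el with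
  | some i => (st.1.set i '\x01', st.2 ++ [(i : Int)])
  | none => (st.1, st.2 ++ [-1])  -- unreachable: el ∈ sort_password always, so Python's .index cannot raise

def form_key (password : String) : List Int :=
  let pw := password.toList
  let sort_password := PySem.List.sorted pw (fun c => c) false
  (pw.foldl formKeyStep (sort_password, [])).2

-- ===== PORT B =====
-- B-side helper: `if c not in start: start[c] = i`
def startStep (d : PySem.Dict Char Int) (ic : Int × Char) : PySem.Dict Char Int :=
  if d.contains ic.2 then d else d.insert ic.2 ic.1

-- B-side helper: one iteration of B's main loop (k = seen.get(c, 0); append start[c] + k; seen[c] = k + 1);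
-- start[c]: c is always a key of start (c ∈ sorted(password)), so getD's default is unreachable
def altStep (start : PySem.Dict Char Int) (st : PySem.Dict Char Int × List Int) (c : Char) :
    PySem.Dict Char Int × List Int :=
  let k := st.1.getD c 0
  (st.1.insert c (k + 1), st.2 ++ [start.getD c 0 + k])

def form_key_alt (password : String) : List Int :=
  let sort_password := PySem.List.sorted password.toList (fun c => c) false
  let start := (PySem.List.enumerate sort_password).foldl startStep PySem.Dict.empty
  (password.toList.foldl (altStep start) (PySem.Dict.empty, [])).2

-- ===== PRECONDITION & SPEC =====
def Spec_form_key (password : String) (out : List Int) : Prop := out = form_key_alt password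
instance (password : String) (out : List Int) : Decidable (Spec_form_key password out) := by unfold Spec_form_key; infer_instance

-- ===== CLAIM (what is proved, stated in full; the proofs are below) =====
def Claim_equal_form_key : Prop := ∀ (password : String), Dom_form_key password → Spec_form_key password (form_key password)

-- ===== LEMMAS AND PROOFS =====

-- `markF s cnt` = s with, for each value v, its first `cnt v` occurrences replaced by '\x01'
def drop1 (cnt : Char → Nat) (x : Char) : Char → Nat :=
  fun v => if v = x then cnt v - 1 else cnt v

def markF : List Char → (Char → Nat) → List Char
  | [], _ => []
  | x :: t, cnt =>
      if cnt x = 0 then x :: markF t cnt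
      else '\x01' :: markF t (drop1 cnt x)

def bump (cnt : Char → Nat) (el : Char) : Char → Nat :=
  fun v => if v = el then cnt v + 1 else cnt v

-- the common reference output: rank of each char = (#chars < c in s) + (#c's already consumed)
def specKey (s : List Char) : List Char → (Char → Nat) → List Int
  | [], _ => []
  | c :: t, cnt =>
      ((s.countP (fun x => decide (x < c)) + cnt c : Nat) : Int) :: specKey s t (bump cnt c)

theorem markF_zero (s : List Char) : markF s (fun _ => 0) = s := by
  induction s with
  | nil => rfl
  | cons x t ih => simp [markF, ih]

theorem index_markF (s : List Char) (cnt : Char → Nat) (el : Char)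
    (hs : s.Pairwise (· ≤ ·)) (hm : '\x01' ∉ s) (hc : cnt el < s.count el) :
    PySem.List.index? (markF s cnt) el
      = some (s.countP (fun x => decide (x < el)) + cnt el) := by
  induction s generalizing cnt with
  | nil => simp at hc
  | cons x t ih =>
    obtain ⟨hx, hpt⟩ := List.pairwise_cons.mp hs
    have hmt : '\x01' ∉ t := fun h => hm (List.mem_cons_of_mem _ h)
    have hel_mem : el ∈ x :: t := List.count_pos_iff.mp (by omega)
    have hel_ne : el ≠ '\x01' := fun h => hm (h ▸ hel_mem)
    by_cases h0 : cnt x = 0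
    · rw [markF, if_pos h0]
      by_cases hxe : x = el
      · subst hxe
        have h1 : t.countP (fun y => decide (y < x)) = 0 :=
          List.countP_eq_zero.mpr (fun y hy => by simpa using not_lt.mpr (hx y hy))
        rw [PySem.List.index?_cons_self]
        rw [List.countP_cons]
        simp [h1, h0]
      · have helt : el ∈ t := by
          rcases List.mem_cons.mp hel_mem with h | h
          · exact absurd h.symm hxe
          · exact h
        have hxlt : x < el := lt_of_le_of_ne (hx el helt) hxe
        have hct : cnt el < t.count el := by
          rw [List.count_cons] at hc
          simpa [hxe] using hc
        rw [PySem.List.index?_cons_of_ne _ hxe, ih cnt hpt hmt hct]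
        rw [List.countP_cons]
        simp only [Option.map_some]
        congr 1
        simp [hxlt]
        omega
    · rw [markF, if_neg h0]
      have hne1 : ('\x01' : Char) ≠ el := fun h => hel_ne h.symm
      rw [PySem.List.index?_cons_of_ne _ hne1]
      by_cases hxe : x = el
      · subst hxe
        have hct : drop1 cnt x x < t.count x := by
          rw [List.count_cons] at hc
          simp at hc
          have hd : drop1 cnt x x = cnt x - 1 := by simp [drop1]
          rw [hd]
          omega
        rw [ih _ hpt hmt hct]
        rw [List.countP_cons]
        simp only [Option.map_some]
        congr 1
        simp [drop1]
        omega
      · have helt : el ∈ t := by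
          rcases List.mem_cons.mp hel_mem with h | h
          · exact absurd h.symm hxe
          · exact h
        have hxlt : x < el := lt_of_le_of_ne (hx el helt) hxe
        have hct : drop1 cnt x el < t.count el := by
          rw [List.count_cons] at hc
          simp [hxe] at hc
          simp only [drop1, if_neg (fun (h : el = x) => hxe h.symm)]
          exact hc
        rw [ih _ hpt hmt hct]
        rw [List.countP_cons]
        simp only [Option.map_some]
        congr 1
        simp [drop1, hxlt, if_neg (fun (h : el = x) => hxe h.symm)]
        omega

theorem set_markF (s : List Char) (cnt : Char → Nat) (el : Char)
    (hs : s.Pairwise (· ≤ ·)) (hm : '\x01' ∉ s) (hc : cnt el < s.count el) :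
    (markF s cnt).set (s.countP (fun x => decide (x < el)) + cnt el) '\x01'
      = markF s (bump cnt el) := by
  induction s generalizing cnt with
  | nil => simp at hc
  | cons x t ih =>
    obtain ⟨hx, hpt⟩ := List.pairwise_cons.mp hs
    have hmt : '\x01' ∉ t := fun h => hm (List.mem_cons_of_mem _ h)
    have hel_mem : el ∈ x :: t := List.count_pos_iff.mp (by omega)
    by_cases h0 : cnt x = 0
    · by_cases hxe : x = el
      · subst hxe
        have h1 : t.countP (fun y => decide (y < x)) = 0 :=
          List.countP_eq_zero.mpr (fun y hy => by simpa using not_lt.mpr (hx y hy))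
        have hpos : (x :: t).countP (fun y => decide (y < x)) + cnt x = 0 := by
          rw [List.countP_cons]; simp [h1, h0]
        have h2 : ¬ bump cnt x x = 0 := by simp [bump]
        have hfun : drop1 (bump cnt x) x = cnt := by
          funext v; by_cases hv : v = x <;> simp [bump, drop1, hv, h0]
        rw [hpos]
        simp only [markF, if_pos h0, if_neg h2, hfun, List.set_cons_zero]
      · have helt : el ∈ t := by
          rcases List.mem_cons.mp hel_mem with h | h
          · exact absurd h.symm hxe
          · exact h
        have hxlt : x < el := lt_of_le_of_ne (hx el helt) hxe
        have hct : cnt el < t.count el := by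
          rw [List.count_cons] at hc
          simpa [hxe] using hc
        have hpos : (x :: t).countP (fun y => decide (y < el)) + cnt el
            = (t.countP (fun y => decide (y < el)) + cnt el) + 1 := by
          rw [List.countP_cons]; simp [hxlt]; omega
        have hb : bump cnt el x = 0 := by simp [bump, hxe, h0]
        rw [hpos]
        simp only [markF, if_pos h0, if_pos hb, List.set_cons_succ]
        rw [ih cnt hpt hmt hct]
    · by_cases hxe : x = el
      · subst hxe
        have hct : drop1 cnt x x < t.count x := by
          rw [List.count_cons] at hc
          simp at hc
          have hd : drop1 cnt x x = cnt x - 1 := by simp [drop1]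
          rw [hd]
          omega
        have h2 : ¬ bump cnt x x = 0 := by simp [bump]
        have hpos : (x :: t).countP (fun y => decide (y < x)) + cnt x
            = (t.countP (fun y => decide (y < x)) + drop1 cnt x x) + 1 := by
          rw [List.countP_cons]; simp [drop1]; omega
        have hfun : bump (drop1 cnt x) x = drop1 (bump cnt x) x := by
          funext v; by_cases hv : v = x <;> simp [bump, drop1, hv] <;> omega
        rw [hpos]
        simp only [markF, if_neg h0, if_neg h2, List.set_cons_succ]
        rw [ih _ hpt hmt hct, hfun]
      · have helt : el ∈ t := by
          rcases List.mem_cons.mp hel_mem with h | h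
          · exact absurd h.symm hxe
          · exact h
        have hxlt : x < el := lt_of_le_of_ne (hx el helt) hxe
        have hct : drop1 cnt x el < t.count el := by
          rw [List.count_cons] at hc
          simp [hxe] at hc
          simp only [drop1, if_neg (fun (h : el = x) => hxe h.symm)]
          exact hc
        have h2 : ¬ bump cnt el x = 0 := by simp [bump, hxe, h0]
        have hpos : (x :: t).countP (fun y => decide (y < el)) + cnt el
            = (t.countP (fun y => decide (y < el)) + drop1 cnt x el) + 1 := by
          rw [List.countP_cons]
          simp [hxlt, drop1, if_neg (fun (h : el = x) => hxe h.symm)]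
          omega
        have hfun : bump (drop1 cnt x) el = drop1 (bump cnt el) x := by
          funext v
          by_cases hv : v = x
          · subst hv; simp [bump, drop1, hxe]
          · have hne : ¬ el = x := fun h => hxe h.symm
            by_cases hv2 : v = el <;> simp [bump, drop1, hv, hv2, hne]
        rw [hpos]
        simp only [markF, if_neg h0, if_neg h2, List.set_cons_succ]
        rw [ih _ hpt hmt hct, hfun]

theorem foldA_spec (s : List Char) (hs : s.Pairwise (· ≤ ·)) (hm : '\x01' ∉ s) :
    ∀ (rest pre : List Char) (key0 : List Int), s.Perm (pre ++ rest) →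
    rest.foldl formKeyStep (markF s (fun v => pre.count v), key0)
      = (markF s (fun v => (pre ++ rest).count v),
         key0 ++ specKey s rest (fun v => pre.count v)) := by
  intro rest
  induction rest with
  | nil => intro pre key0 hperm; simp [specKey]
  | cons c t ih =>
    intro pre key0 hperm
    have hcount : (fun v => pre.count v) c < s.count c := by
      rw [hperm.count_eq c, List.count_append, List.count_cons]
      simp
    have hidx := index_markF s (fun v => pre.count v) c hs hm hcount
    have hset := set_markF s (fun v => pre.count v) c hs hm hcount
    rw [List.foldl_cons]
    simp only [formKeyStep, hidx]
    rw [hset]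
    have hbump : bump (fun v => pre.count v) c = fun v => (pre ++ [c]).count v := by
      funext v
      by_cases hv : v = c
      · subst hv; simp [bump, List.count_append]
      · simp [bump, hv, List.count_append,
          (show ¬ c = v from fun h => hv h.symm)]
    rw [hbump]
    have hperm' : s.Perm ((pre ++ [c]) ++ t) := by
      simpa using hperm
    rw [ih (pre ++ [c]) _ hperm']
    have hpre : (pre ++ [c]) ++ t = pre ++ (c :: t) := by simp
    rw [hpre]
    have hcnt' : (fun v => (pre ++ [c]).count v) = bump (fun v => pre.count v) c := hbump.symm
    rw [hcnt']
    simp [specKey]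

-- start-table lemmas
theorem startFold_preserved (l : List (Int × Char)) (d : PySem.Dict Char Int) (c : Char)
    (h : d.contains c = true) (v : Int) :
    (l.foldl startStep d).getD c v = d.getD c v := by
  induction l generalizing d with
  | nil => simp
  | cons p l ih =>
    rw [List.foldl_cons]
    by_cases hc2 : d.contains p.2
    · simp only [startStep, if_pos hc2]
      exact ih d h
    · simp only [startStep, if_neg hc2]
      have hcd : (d.insert p.2 p.1).contains c = true := by
        rw [PySem.Dict.contains_insert]; simp [h]
      rw [ih _ hcd]
      have hne : c ≠ p.2 := fun he => by rw [he] at h; rw [h] at hc2; exact hc2 rfl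
      rw [PySem.Dict.getD_insert]
      simp [hne]

theorem startFold_spec (s : List Char) (hs : s.Pairwise (· ≤ ·)) :
    ∀ (n : Int) (d : PySem.Dict Char Int) (c : Char), c ∈ s → d.contains c = false →
    ((PySem.List.enumerate s n).foldl startStep d).getD c 0
      = n + (s.countP (fun x => decide (x < c)) : Int) := by
  induction s with
  | nil => intro n d c hcmem; simp at hcmem
  | cons x t ih =>
    intro n d c hcmem hdc
    obtain ⟨hx, hpt⟩ := List.pairwise_cons.mp hs
    rw [PySem.List.enumerate_cons, List.foldl_cons]
    by_cases hxc : x = c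
    · subst hxc
      have hstep : startStep d (n, x) = d.insert x n := by simp [startStep, hdc]
      rw [hstep]
      rw [startFold_preserved _ _ _ (PySem.Dict.contains_insert_self _ _ _)]
      rw [PySem.Dict.getD_insert_self]
      have h1 : t.countP (fun y => decide (y < x)) = 0 :=
        List.countP_eq_zero.mpr (fun y hy => by simpa using not_lt.mpr (hx y hy))
      rw [List.countP_cons]
      simp [h1]
    · have helt : c ∈ t := by
        rcases List.mem_cons.mp hcmem with h | h
        · exact absurd h.symm hxc
        · exact h
      have hxlt : x < c := lt_of_le_of_ne (hx c helt) hxc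
      have hd' : (startStep d (n, x)).contains c = false := by
        by_cases hdx : d.contains x <;>
          simp [startStep, hdx, PySem.Dict.contains_insert, hdc,
            (show ¬ c = x from fun h => hxc h.symm)]
      rw [ih hpt (n + 1) _ c helt hd']
      rw [List.countP_cons]
      simp [hxlt]
      push_cast
      ring

theorem foldB_spec (s : List Char) (start : PySem.Dict Char Int) :
    ∀ (rest pre : List Char) (d : PySem.Dict Char Int) (key0 : List Int),
    (∀ c ∈ rest, start.getD c 0 = (s.countP (fun x => decide (x < c)) : Int)) →
    (∀ c, d.getD c 0 = (pre.count c : Int)) →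
    (rest.foldl (altStep start) (d, key0)).2
      = key0 ++ specKey s rest (fun v => pre.count v) := by
  intro rest
  induction rest with
  | nil => intro pre d key0 hstart hd; simp [specKey]
  | cons c t ih =>
    intro pre d key0 hstart hd
    rw [List.foldl_cons]
    simp only [altStep]
    have hv : start.getD c 0 + d.getD c 0
        = ((s.countP (fun x => decide (x < c)) + pre.count c : Nat) : Int) := by
      rw [hstart c List.mem_cons_self, hd c]
      push_cast
      ring
    have hd' : ∀ v, (d.insert c (d.getD c 0 + 1)).getD v 0 = ((pre ++ [c]).count v : Int) := by
      intro v
      rw [PySem.Dict.getD_insert]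
      by_cases hvc : v = c
      · subst hvc
        rw [if_pos rfl, hd v, List.count_append]
        simp
      · rw [if_neg hvc, hd v, List.count_append]
        simp [(show ¬ c = v from fun h => hvc h.symm)]
    have hbump : (fun v => List.count v (pre ++ [c])) = bump (fun v => List.count v pre) c := by
      funext v
      by_cases hv2 : v = c
      · subst hv2; simp [bump, List.count_append]
      · simp [bump, hv2, List.count_append,
          (show ¬ c = v from fun h => hv2 h.symm)]
    rw [ih (pre ++ [c]) _ _ (fun c' hc' => hstart c' (List.mem_cons_of_mem _ hc')) hd']
    rw [hbump]
    simp [specKey, hv]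

theorem dom_no_mark (password : String) (h : Dom_form_key password) :
    '\x01' ∉ PySem.List.sorted password.toList (fun c => c) false := by
  intro hmem
  have hmem2 : '\x01' ∈ password.toList := (PySem.List.mem_sorted _ _ _ _).mp hmem
  unfold Dom_form_key pvDomStr at h
  have hch := List.all_eq_true.mp h _ hmem2
  exact absurd hch (by decide)

-- ===== VERDICT (by name: the statement is the Claim_ definition above) =====
theorem form_key_spec : Claim_equal_form_key := by
  intro password hdom
  unfold Spec_form_key form_key form_key_alt
  have hs : (PySem.List.sorted password.toList (fun c => c) false).Pairwise (· ≤ ·) := by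
    simpa using PySem.List.sorted_pairwise (xs := password.toList) (key := fun c => c)
  have hm := dom_no_mark password hdom
  have hperm : (PySem.List.sorted password.toList (fun c => c) false).Perm
      ([] ++ password.toList) := by
    simpa using PySem.List.sorted_perm (xs := password.toList) (key := fun c => c) (rev := false)
  have hA := foldA_spec _ hs hm password.toList [] [] hperm
  have hz : (fun v => (([] : List Char)).count v) = (fun _ => (0 : Nat)) := by
    funext v; simp
  rw [hz, markF_zero] at hA
  have hstart : ∀ c ∈ password.toList,
      ((PySem.List.enumerate (PySem.List.sorted password.toList (fun c => c) false)).foldl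
        startStep PySem.Dict.empty).getD c 0
      = ((PySem.List.sorted password.toList (fun c => c) false).countP
          (fun x => decide (x < c)) : Int) := by
    intro c hcmem
    have hcs : c ∈ PySem.List.sorted password.toList (fun c => c) false :=
      (PySem.List.mem_sorted _ _ _ _).mpr hcmem
    have := startFold_spec _ hs 0 PySem.Dict.empty c hcs (by simp)
    simpa using this
  have hB := foldB_spec (PySem.List.sorted password.toList (fun c => c) false) _
    password.toList [] PySem.Dict.empty [] hstart (fun c => by simp)
  rw [hz] at hB
  simp only [hA, hB]
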